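-- pv_equiv track=rewrite | github.com/mitsuo0114/competitive_programming | python/atcoder/Beginner071/C.py | solve
-- ===== SOURCE A (Python) =====
-- from collections import Counter
--
-- def solve(N, As):
--     c = Counter(As)
--     two = sorted([i for i, v in c.items() if v >= 2])
--     four = [i for i, v in c.items() if v >= 4]
--     ans = 0
--     if len(two) >= 2:
--         ans = two[-1] * two[-2]
--     if len(four):
--         ans = max(max(four) * max(four), ans)
--     return ans
-- ===== SOURCE B (Python) =====
-- from collections import Counter
--
-- def solve(N, As):
--     c = Counter(As)
--     m1 = None  # largest distinct value with count >= 2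
--     m2 = None  # second largest distinct value with count >= 2
--     f = None   # largest value with count >= 4
--     for v, cnt in c.items():
--         if cnt >= 2:
--             if m1 is None or v > m1:
--                 m2 = m1
--                 m1 = v
--             elif m2 is None or v > m2:
--                 m2 = v
--         if cnt >= 4:
--             if f is None or v > f:
--                 f = v
--     ans = m1 * m2 if m2 is not None else 0
--     if f is not None:
--         ans = max(f * f, ans)
--     return ans
-- ===== Notes on version B (the rewrite author's own statement) =====
-- stated objective: alternative
-- what changed: B replaces A's two filtering list comprehensions plus sort-and-index-from-the-back by a single linear pass over the counts that tracks the top two distinct values with count>=2 and the maximum value with count>=4.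
import Mathlib
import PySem

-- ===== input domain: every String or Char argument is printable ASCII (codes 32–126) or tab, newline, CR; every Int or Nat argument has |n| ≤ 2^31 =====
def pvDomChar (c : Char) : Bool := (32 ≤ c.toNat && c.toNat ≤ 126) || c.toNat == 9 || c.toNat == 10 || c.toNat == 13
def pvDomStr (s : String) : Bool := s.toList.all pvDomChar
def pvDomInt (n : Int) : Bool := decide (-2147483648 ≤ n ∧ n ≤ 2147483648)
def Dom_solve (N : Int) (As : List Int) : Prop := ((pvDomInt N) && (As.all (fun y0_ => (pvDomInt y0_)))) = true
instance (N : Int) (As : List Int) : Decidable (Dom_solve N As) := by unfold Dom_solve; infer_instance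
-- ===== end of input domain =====

-- B replaces A's filter-sort-index pipeline by one linear pass over the counts that tracks the
-- top two distinct values with count ≥ 2 and the max value with count ≥ 4 (objective: alternative).

-- ===== PORT A =====
def solve (N : Int) (As : List Int) : Int :=
  let c := PySem.Dict.counter As
  let two := PySem.List.sorted ((c.items.filter (fun p => decide (2 ≤ p.2))).map (fun p => p.1)) (fun x => x) false
  let four := (c.items.filter (fun p => decide (4 ≤ p.2))).map (fun p => p.1)
  let ans : Int := 0
  let ans := if 2 ≤ two.length then
      PySem.List.pyGetD two (-1) 0 * PySem.List.pyGetD two (-2) 0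
    else ans
  let ans := if four ≠ [] then
      -- max(four): guarded by 'if len(four)', so the Option is some; getD 0 is never the default
      max ((PySem.List.max? four (fun x => x)).getD 0 * (PySem.List.max? four (fun x => x)).getD 0) ans
    else ans
  ans

-- ===== PORT B =====
-- 'if m1 is None or v > m1: m2, m1 = m1, v elif m2 is None or v > m2: m2 = v'
def altStep2 (s : Option Int × Option Int) (v : Int) : Option Int × Option Int :=
  if (match s.1 with | none => true | some a => decide (a < v)) then (some v, s.1)
  else if (match s.2 with | none => true | some a => decide (a < v)) then (s.1, some v)
  else s

-- 'if f is None or v > f: f = v'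
def altStepF (f : Option Int) (v : Int) : Option Int :=
  if (match f with | none => true | some a => decide (a < v)) then some v else f

def solve_alt (N : Int) (As : List Int) : Int :=
  let counts : PySem.Dict Int Int := PySem.Dict.counter As
  let s := counts.items.foldl
    (fun (s : (Option Int × Option Int) × Option Int) p =>
      ((if 2 ≤ p.2 then altStep2 s.1 p.1 else s.1),
       (if 4 ≤ p.2 then altStepF s.2 p.1 else s.2)))
    ((none, none), none)
  let ans : Int :=
    match s.1.1, s.1.2 with
    | some m1, some m2 => m1 * m2
    | _, _ => 0
  match s.2 with
  | some fv => max (fv * fv) ans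
  | none => ans

-- ===== PRECONDITION & SPEC =====
def Spec_solve (N : Int) (As : List Int) (out : Int) : Prop := out = solve_alt N As
instance (N : Int) (As : List Int) (out : Int) : Decidable (Spec_solve N As out) := by unfold Spec_solve; infer_instance

-- ===== CLAIM (what is proved, stated in full; the proofs are below) =====
def Claim_equal_solve : Prop := ∀ (N : Int) (As : List Int), Dom_solve N As → Spec_solve N As (solve N As)

-- ===== LEMMAS AND PROOFS =====

lemma altStep2_rcomm (s : Option Int × Option Int) (a b : Int) :
    altStep2 (altStep2 s a) b = altStep2 (altStep2 s b) a := by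
  obtain ⟨m1, m2⟩ := s
  cases m1 <;> cases m2 <;>
    simp only [altStep2] <;>
    repeat' (first | (split_ifs <;> try rfl) | simp_all | omega)

lemma altStepF_some (t : List Int) (a : Int) :
    t.foldl altStepF (some a) = some (t.foldl max a) := by
  induction t generalizing a with
  | nil => rfl
  | cons x t ih =>
    have h : altStepF (some a) x = some (max a x) := by
      simp only [altStepF]; split_ifs <;> congr 1 <;> simp only [decide_eq_true_eq] at * <;> omega
    simp [List.foldl_cons, h, ih]

lemma foldl_altStepF_eq_max? (l : List Int) :
    l.foldl altStepF none = PySem.List.max? l (fun x => x) := by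
  cases l with
  | nil => rfl
  | cons x t =>
    simp [List.foldl_cons, altStepF, altStepF_some, PySem.List.max?_id_cons]

lemma foldl_altStep2_sorted (S : List Int) (h : S.Pairwise (· ≤ ·)) :
    S.foldl altStep2 (none, none) = (S.getLast?, S.dropLast.getLast?) := by
  induction S using List.reverseRecOn with
  | nil => rfl
  | append_singleton S v ih =>
    have hS : S.Pairwise (· ≤ ·) := (List.pairwise_append.mp h).1
    have hle : ∀ x ∈ S, x ≤ v := by
      intro x hx
      exact (List.pairwise_append.mp h).2.2 x hx v (List.mem_singleton_self v)
    rw [List.foldl_append, ih hS]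
    simp only [List.foldl_cons, List.foldl_nil]
    have hlast : (S ++ [v]).getLast? = some v := by simp
    have hdrop : (S ++ [v]).dropLast = S := by simp
    rw [hlast, hdrop]
    cases hS1 : S.getLast? with
    | none =>
      have : S = [] := List.getLast?_eq_none_iff.mp hS1
      subst this; rfl
    | some a =>
      have ha : a ≤ v := hle a (List.mem_of_getLast? hS1)
      cases hS2 : S.dropLast.getLast? with
      | none =>
        simp only [altStep2]
        repeat' (first | (split_ifs <;> try rfl) | simp_all | omega)
      | some b =>
        have hb : b ≤ v := hle b (List.dropLast_subset S (List.mem_of_getLast? hS2))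
        simp only [altStep2]
        repeat' (first | (split_ifs <;> try rfl) | simp_all | omega)

-- A's sorted-and-index-from-the-back answer equals the match on (last, second-to-last)
lemma two_branch (S : List Int) :
    (if 2 ≤ S.length then PySem.List.pyGetD S (-1) 0 * PySem.List.pyGetD S (-2) 0 else 0)
      = (match S.getLast?, S.dropLast.getLast? with
         | some m1, some m2 => m1 * m2
         | _, _ => (0 : Int)) := by
  by_cases h2 : 2 ≤ S.length
  · obtain ⟨a, ha⟩ : ∃ a, S.getLast? = some a := by
      cases hS : S.getLast? with
      | none => simp [List.getLast?_eq_none_iff.mp hS] at h2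
      | some a => exact ⟨a, rfl⟩
    obtain ⟨b, hb⟩ : ∃ b, S.dropLast.getLast? = some b := by
      cases hS : S.dropLast.getLast? with
      | none =>
        have h0 := congrArg List.length (List.getLast?_eq_none_iff.mp hS)
        simp [List.length_dropLast] at h0
        omega
      | some b => exact ⟨b, rfl⟩
    rw [ha, hb, if_pos h2]
    rw [PySem.List.pyGetD_neg_ofNat S 1 0 (by omega) (by omega),
        PySem.List.pyGetD_neg_ofNat S 2 0 (by omega) (by omega)]
    have ha' : S[S.length - 1] = a := by
      have := List.getLast?_eq_getElem? (l := S)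
      rw [ha] at this
      have hlt : S.length - 1 < S.length := by omega
      simp [List.getElem?_eq_getElem hlt] at this
      exact this.symm
    have hb' : S[S.length - 2] = b := by
      have hlen : S.dropLast.length = S.length - 1 := List.length_dropLast
      have hlt2 : S.length - 2 < S.dropLast.length := by omega
      have hsome : S.dropLast[S.length - 2]? = some b := by
        have h5 := List.getLast?_eq_getElem? (l := S.dropLast)
        rw [hb, hlen, show S.length - 1 - 1 = S.length - 2 from by omega] at h5
        exact h5.symm
      rw [List.getElem?_eq_getElem hlt2] at hsome
      have h6 : S.dropLast[S.length - 2]'hlt2 = b := Option.some.inj hsome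
      rwa [List.getElem_dropLast] at h6
    rw [ha', hb']
  · have hdl : S.dropLast = [] := by
      have := List.length_dropLast (xs := S)
      have : S.dropLast.length = 0 := by omega
      exact List.length_eq_zero_iff.mp this
    rw [if_neg h2, hdl]
    cases S.getLast? <;> rfl

-- A's guarded max-of-four branch equals the match on the Option max
lemma four_branch (l : List Int) (ans : Int) :
    (if l ≠ [] then
        max ((PySem.List.max? l (fun x => x)).getD 0 * (PySem.List.max? l (fun x => x)).getD 0) ans
      else ans)
      = (match PySem.List.max? l (fun x => x) with
         | some fv => max (fv * fv) ans
         | none => ans) := by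
  cases hm : PySem.List.max? l (fun x => x) with
  | none =>
    have : l = [] := (PySem.List.max?_eq_none_iff l (fun x => x)).mp hm
    simp [this]
  | some m =>
    have hne : l ≠ [] := by
      intro h
      rw [h] at hm
      simp [PySem.List.max?] at hm
    simp [hne]

lemma solve_eq_solve_alt (N : Int) (As : List Int) : solve N As = solve_alt N As := by
  simp only [solve, solve_alt]
  set items := (PySem.Dict.counter As).items with hitems
  rw [PySem.List.foldl_prod_mk
        (f := fun (s : Option Int × Option Int) (p : Int × Int) => if (2:Int) ≤ p.2 then altStep2 s p.1 else s)
        (g := fun (s : Option Int) (p : Int × Int) => if (4:Int) ≤ p.2 then altStepF s p.1 else s)]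
  rw [PySem.List.foldl_ite_eq_foldl_filter (fun (p : Int × Int) => (2:Int) ≤ p.2) (fun (s : Option Int × Option Int) (p : Int × Int) => altStep2 s p.1)]
  rw [PySem.List.foldl_ite_eq_foldl_filter (fun (p : Int × Int) => (4:Int) ≤ p.2) (fun (s : Option Int) (p : Int × Int) => altStepF s p.1)]
  rw [show (fun (s : Option Int × Option Int) (p : Int × Int) => altStep2 s p.1)
        = (fun s p => altStep2 s ((fun q : Int × Int => q.1) p)) from rfl,
      ← List.foldl_map (f := fun q : Int × Int => q.1) (g := altStep2)]
  rw [show (fun (s : Option Int) (p : Int × Int) => altStepF s p.1)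
        = (fun s p => altStepF s ((fun q : Int × Int => q.1) p)) from rfl,
      ← List.foldl_map (f := fun q : Int × Int => q.1) (g := altStepF)]
  set L2 := (items.filter (fun p => decide ((2:Int) ≤ p.2))).map (fun p => p.1) with hL2
  set L4 := (items.filter (fun p => decide ((4:Int) ≤ p.2))).map (fun p => p.1) with hL4
  rw [foldl_altStepF_eq_max?]
  have hperm : (PySem.List.sorted L2 (fun x => x) false).Perm L2 :=
    PySem.List.sorted_perm L2 (fun x => x) false
  have hfold : L2.foldl altStep2 (none, none)
      = (PySem.List.sorted L2 (fun x => x) false).foldl altStep2 (none, none) :=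
    (@List.Perm.foldl_eq _ _ altStep2 _ _ ⟨fun s a b => altStep2_rcomm s a b⟩ hperm ((none, none))).symm
  rw [hfold,
      foldl_altStep2_sorted (PySem.List.sorted L2 (fun x => x) false)
        (PySem.List.sorted_pairwise L2 (fun x => x))]
  rw [← two_branch (PySem.List.sorted L2 (fun x => x) false), ← four_branch L4]

-- ===== VERDICT (by name: the statement is the Claim_ definition above) =====
theorem solve_spec : Claim_equal_solve := by
  intro N As _
  unfold Spec_solve
  exact solve_eq_solve_alt N As
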